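-- pv_equiv track=rewrite | github.com/Aasthaengg/IBMdataset | Python_codes/p03263/s802499596.py | ggg
-- ===== SOURCE A (Python) =====
-- def ggg(h,w):
-- 	a=0
-- 	b=0
-- 	while b < h:
-- 		if b%2==0 and a == w-1:
-- 			na = a
-- 			nb = b+1
-- 		elif b %2==0:
-- 				na = a+1
-- 				nb = b
-- 		elif a == 0:
-- 			na=a
-- 			nb = b+1
-- 		else:
-- 			na = a-1
-- 			nb = b
-- 		yield a, b, na, nb
-- 		a=na
-- 		b=nb
-- ===== SOURCE B (Python) =====
-- def ggg(h, w):
--     cells = []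
--     for b in range(h):
--         cols = range(w) if b % 2 == 0 else range(w - 1, -1, -1)
--         for a in cols:
--             cells.append((a, b))
--     if cells:
--         nexts = cells[1:] + [(cells[-1][0], h)]
--         for (a, b), (na, nb) in zip(cells, nexts):
--             yield a, b, na, nb
-- ===== Notes on version B (the rewrite author's own statement) =====
-- stated objective: alternative
-- what changed: B first materialises the snake-order cell list (row by row, alternating column direction) and then pairs each cell with its successor in that list (the last cell with (a,h)), replacing A's stateful while-loop that recomputes the next position by parity/boundary case analysis at every step.
import Mathlib
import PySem

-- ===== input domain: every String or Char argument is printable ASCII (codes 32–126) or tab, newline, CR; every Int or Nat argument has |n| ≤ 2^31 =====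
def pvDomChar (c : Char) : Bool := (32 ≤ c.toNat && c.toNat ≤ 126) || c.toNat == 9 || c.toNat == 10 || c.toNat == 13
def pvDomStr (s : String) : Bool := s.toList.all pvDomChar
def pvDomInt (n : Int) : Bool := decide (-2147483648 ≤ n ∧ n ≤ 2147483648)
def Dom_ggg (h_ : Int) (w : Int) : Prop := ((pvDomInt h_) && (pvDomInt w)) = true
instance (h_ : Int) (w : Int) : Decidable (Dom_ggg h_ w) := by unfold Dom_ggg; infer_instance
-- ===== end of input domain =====

-- B builds the snake-order cell list once and zips each cell with its successor, instead of A's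
-- stateful while-loop recomputing the next position by parity/boundary case analysis (objective: alternative).
-- ===== PORT A =====
-- A's while-loop; the fuel (h*w+1) covers every iteration the Python loop performs on
-- inputs satisfying Pre_ggg (on w ≤ 0 < h the Python loop never terminates; excluded by Pre_).
def gggLoop (h_ : Int) (w : Int) : Int → Int → Nat → List (Int × Int × Int × Int)
  | _, _, 0 => []
  | a, b, fuel + 1 =>
    if b < h_ then
      let na_nb : Int × Int :=
        if PySem.Int.mod b 2 = 0 ∧ a = w - 1 then (a, b + 1)
        else if PySem.Int.mod b 2 = 0 then (a + 1, b)
        else if a = 0 then (a, b + 1)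
        else (a - 1, b)
      (a, b, na_nb.1, na_nb.2) :: gggLoop h_ w na_nb.1 na_nb.2 fuel
    else []

def ggg (h_ : Int) (w : Int) : List (Int × Int × Int × Int) :=
  gggLoop h_ w 0 0 (h_.toNat * w.toNat + 1)

-- ===== PORT B =====
def snakeCells (h_ : Int) (w : Int) : List (Int × Int) :=
  (PySem.List.pyRange 0 h_ 1).flatMap (fun b =>
    (if PySem.Int.mod b 2 = 0 then PySem.List.pyRange 0 w 1
     else PySem.List.pyRange (w - 1) (-1) (-1)).map (fun a => (a, b)))

def ggg_alt (h_ : Int) (w : Int) : List (Int × Int × Int × Int) :=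
  let cells := snakeCells h_ w
  match cells with
  | [] => []
  | _ :: _ =>
    let nexts := PySem.List.slice cells (some 1) none ++ [((PySem.List.pyGetD cells (-1) (0, 0)).1, h_)]
    (cells.zip nexts).map (fun p => (p.1.1, p.1.2, p.2.1, p.2.2))

-- ===== PRECONDITION & SPEC =====
-- Pre_ excludes w ≤ 0 < h_, exactly where Python A loops forever (a never reaches w-1).
def Pre_ggg (h_ : Int) (w : Int) : Prop := h_ ≤ 0 ∨ 1 ≤ w
instance (h_ : Int) (w : Int) : Decidable (Pre_ggg h_ w) := by unfold Pre_ggg; infer_instance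
def pvWitness_ggg : Int × Int := (3, 4)

def Spec_ggg (h_ : Int) (w : Int) (out : List (Int × Int × Int × Int)) : Prop := out = ggg_alt h_ w
instance (h_ : Int) (w : Int) (out : List (Int × Int × Int × Int)) : Decidable (Spec_ggg h_ w out) := by unfold Spec_ggg; infer_instance

-- ===== CLAIM (what is proved, stated in full; the proofs are below) =====
def Claim_equal_ggg : Prop := ∀ (h_ : Int) (w : Int), Dom_ggg h_ w → Pre_ggg h_ w → Spec_ggg h_ w (ggg h_ w)

-- ===== LEMMAS AND PROOFS =====

-- proof-side helpers
def rowCells (w b : Int) : List (Int × Int) :=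
  (if PySem.Int.mod b 2 = 0 then PySem.List.pyRange 0 w 1
   else PySem.List.pyRange (w - 1) (-1) (-1)).map (fun a => (a, b))

def cellsFrom (w : Int) : Nat → Int → List (Int × Int)
  | 0, _ => []
  | n + 1, b => rowCells w b ++ cellsFrom w n (b + 1)

def rowTail (w a b : Int) : List (Int × Int) :=
  (if PySem.Int.mod b 2 = 0 then PySem.List.pyRange a w 1
   else PySem.List.pyRange a (-1) (-1)).map (fun c => (c, b))

def remCells (h_ w a b : Int) : List (Int × Int) :=
  if b < h_ then rowTail w a b ++ cellsFrom w (h_ - (b + 1)).toNat (b + 1) else []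

def pairNext (h_ : Int) : List (Int × Int) → List (Int × Int × Int × Int)
  | [] => []
  | [(a, b)] => [(a, b, a, h_)]
  | (a, b) :: c :: t => (a, b, c.1, c.2) :: pairNext h_ (c :: t)

lemma mod2_eq (b : Int) : PySem.Int.mod b 2 = b % 2 :=
  PySem.Int.mod_eq_emod_of_pos (by omega)

lemma pairNext_cons_cons (h_ a b : Int) (c : Int × Int) (t : List (Int × Int)) :
    pairNext h_ ((a, b) :: c :: t) = (a, b, c.1, c.2) :: pairNext h_ (c :: t) := rfl

lemma zip_pairNext (h_ : Int) :
    ∀ (l : List (Int × Int)) (hne : l ≠ []),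
      (l.zip (l.drop 1 ++ [((l.getLast hne).1, h_)])).map
          (fun p => (p.1.1, p.1.2, p.2.1, p.2.2)) = pairNext h_ l := by
  intro l
  induction l with
  | nil => intro hne; exact absurd rfl hne
  | cons x t ih =>
    intro hne
    obtain ⟨a, b⟩ := x
    cases t with
    | nil => simp [pairNext]
    | cons y t' =>
      rw [List.getLast_cons (List.cons_ne_nil y t')]
      rw [pairNext_cons_cons]
      rw [← ih (List.cons_ne_nil y t')]
      simp

lemma alt_eq (h_ w : Int) : ggg_alt h_ w = pairNext h_ (snakeCells h_ w) := by
  unfold ggg_alt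
  cases hc : snakeCells h_ w with
  | nil => simp [pairNext]
  | cons c cs =>
    simp only
    have hne : c :: cs ≠ [] := List.cons_ne_nil c cs
    have hs : PySem.List.slice (c :: cs) (some 1) none = (c :: cs).drop 1 := by
      have := PySem.List.slice_from_natCast (xs := c :: cs) (a := 1)
      simpa using this
    rw [hs, PySem.List.pyGetD_neg_one (c :: cs) ((0 : Int), (0 : Int)) hne]
    exact zip_pairNext h_ (c :: cs) hne

lemma snake_aux (w : Int) : ∀ (n : Nat) (b : Int),
    (PySem.List.pyRange b (b + n) 1).flatMap
      (fun bb => (if PySem.Int.mod bb 2 = 0 then PySem.List.pyRange 0 w 1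
                  else PySem.List.pyRange (w - 1) (-1) (-1)).map (fun a => (a, bb)))
      = cellsFrom w n b := by
  intro n
  induction n with
  | zero => intro b; simp [PySem.List.pyRange_one_eq_nil, cellsFrom]
  | succ n ih =>
    intro b
    rw [PySem.List.pyRange_one_cons (a := b) (b := b + ((n + 1 : Nat) : Int)) (by push_cast; omega)]
    rw [show b + ((n + 1 : Nat) : Int) = (b + 1) + (n : Nat) by push_cast; ring]
    rw [List.flatMap_cons, ih (b + 1)]
    rfl

lemma snake_eq (h_ w : Int) : snakeCells h_ w = cellsFrom w h_.toNat 0 := by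
  unfold snakeCells
  by_cases h0 : 0 ≤ h_
  · rw [show h_ = 0 + (h_.toNat : Int) by omega]
    rw [snake_aux w h_.toNat 0]
    congr 1
    omega
  · rw [PySem.List.pyRange_one_eq_nil (a := 0) (b := h_) (by omega)]
    rw [show h_.toNat = 0 by omega]
    simp [cellsFrom]

lemma length_rowCells (w b : Int) : (rowCells w b).length = w.toNat := by
  unfold rowCells
  split
  · simp only [List.length_map, PySem.List.length_pyRange_one]
    omega
  · simp only [List.length_map, PySem.List.length_pyRange_neg_one]
    omega

lemma length_cellsFrom (w : Int) : ∀ (n : Nat) (b : Int),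
    (cellsFrom w n b).length = n * w.toNat := by
  intro n
  induction n with
  | zero => intro b; simp [cellsFrom]
  | succ n ih =>
    intro b
    simp [cellsFrom, length_rowCells, ih (b + 1)]
    ring

lemma remCells_head (h_ w na nb : Int) (h : nb < h_) (h0 : 0 ≤ na) (hnw : na < w) :
    remCells h_ w na nb = (na, nb) :: (remCells h_ w na nb).tail := by
  unfold remCells rowTail
  rw [if_pos h]
  split
  · rw [PySem.List.pyRange_one_cons hnw]; rfl
  · rw [PySem.List.pyRange_neg_one_cons (show (-1 : Int) < na by omega)]; rfl

lemma rem_step_even_mid (h_ w a b : Int) (hbh : b < h_) (hp : PySem.Int.mod b 2 = 0)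
    (haw : a < w) :
    remCells h_ w a b = (a, b) :: remCells h_ w (a + 1) b := by
  unfold remCells rowTail
  rw [if_pos hbh, if_pos hbh, if_pos hp, if_pos hp,
      PySem.List.pyRange_one_cons haw]
  simp

lemma rem_step_odd_mid (h_ w a b : Int) (hbh : b < h_) (hp : ¬ PySem.Int.mod b 2 = 0)
    (ha0 : 0 ≤ a) :
    remCells h_ w a b = (a, b) :: remCells h_ w (a - 1) b := by
  unfold remCells rowTail
  rw [if_pos hbh, if_pos hbh, if_neg hp, if_neg hp,
      PySem.List.pyRange_neg_one_cons (show (-1 : Int) < a by omega)]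
  simp

lemma rem_step_even_end (h_ w b : Int) (hbh : b < h_)
    (hp : PySem.Int.mod b 2 = 0) :
    remCells h_ w (w - 1) b = (w - 1, b) :: remCells h_ w (w - 1) (b + 1) := by
  have hrow : rowTail w (w - 1) b = [(w - 1, b)] := by
    unfold rowTail
    rw [if_pos hp, PySem.List.pyRange_one_cons (show w - 1 < w by omega),
        PySem.List.pyRange_one_eq_nil (a := w - 1 + 1) (b := w) (by omega)]
    simp
  unfold remCells
  rw [if_pos hbh, hrow]
  by_cases hb1 : b + 1 < h_
  · have hodd : ¬ PySem.Int.mod (b + 1) 2 = 0 := by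
      rw [mod2_eq] at *; omega
    have hm : (h_ - (b + 1)).toNat = (h_ - (b + 1 + 1)).toNat + 1 := by omega
    rw [if_pos hb1, hm]
    simp only [cellsFrom, List.singleton_append, List.cons.injEq, true_and]
    congr 1
    unfold rowTail rowCells
    rw [if_neg hodd, if_neg hodd]
  · have hm0 : (h_ - (b + 1)).toNat = 0 := by omega
    rw [if_neg hb1, hm0]
    rfl

lemma rem_step_odd_end (h_ w b : Int) (hbh : b < h_)
    (hp : ¬ PySem.Int.mod b 2 = 0) :
    remCells h_ w 0 b = (0, b) :: remCells h_ w 0 (b + 1) := by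
  have hrow : rowTail w 0 b = [(0, b)] := by
    unfold rowTail
    rw [if_neg hp, PySem.List.pyRange_neg_one_cons (show (-1 : Int) < 0 by omega),
        PySem.List.pyRange_neg_one_eq_nil (show (0 : Int) - 1 ≤ -1 by omega)]
    simp
  unfold remCells
  rw [if_pos hbh, hrow]
  by_cases hb1 : b + 1 < h_
  · have heven : PySem.Int.mod (b + 1) 2 = 0 := by
      rw [mod2_eq] at *; omega
    have hm : (h_ - (b + 1)).toNat = (h_ - (b + 1 + 1)).toNat + 1 := by omega
    rw [if_pos hb1, hm]
    simp only [cellsFrom, List.singleton_append, List.cons.injEq, true_and]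
    congr 1
    unfold rowTail rowCells
    rw [if_pos heven, if_pos heven]
  · have hm0 : (h_ - (b + 1)).toNat = 0 := by omega
    rw [if_neg hb1, hm0]
    rfl

lemma remCells_nil (h_ w a b : Int) (h : ¬ b < h_) : remCells h_ w a b = [] := by
  unfold remCells; rw [if_neg h]

lemma loop_step (h_ w a b na nb : Int) (hbh : b < h_) (fuel : Nat)
    (hstep : remCells h_ w a b = (a, b) :: remCells h_ w na nb)
    (hna0 : 0 ≤ na) (hnaw : na < w)
    (hlen : (remCells h_ w na nb).length < fuel)
    (ih : gggLoop h_ w na nb fuel = pairNext h_ (remCells h_ w na nb))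
    (hend : ¬ nb < h_ → na = a ∧ nb = h_) :
    (a, b, na, nb) :: gggLoop h_ w na nb fuel = pairNext h_ (remCells h_ w a b) := by
  rw [hstep, ih]
  by_cases hnbh : nb < h_
  · rw [remCells_head h_ w na nb hnbh hna0 hnaw, pairNext_cons_cons,
        ← remCells_head h_ w na nb hnbh hna0 hnaw]
  · obtain ⟨hna, hnbe⟩ := hend hnbh
    rw [remCells_nil h_ w na nb hnbh]
    subst hna hnbe
    rfl

lemma loop_eq (h_ w : Int) (_hw : 1 ≤ w) :
    ∀ (fuel : Nat) (a b : Int), 0 ≤ b →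
      (b < h_ → 0 ≤ a ∧ a < w) →
      (remCells h_ w a b).length < fuel →
      gggLoop h_ w a b fuel = pairNext h_ (remCells h_ w a b) := by
  intro fuel
  induction fuel with
  | zero => intro a b _ _ hlen; omega
  | succ fuel ih =>
    intro a b hb hval hlen
    by_cases hbh : b < h_
    · obtain ⟨ha0, haw⟩ := hval hbh
      by_cases hp : PySem.Int.mod b 2 = 0
      · by_cases ha : a = w - 1
        · subst ha
          have hstep := rem_step_even_end h_ w b hbh hp
          have hlen' : (remCells h_ w (w - 1) (b + 1)).length < fuel := by
            rw [hstep] at hlen; simp at hlen; omega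
          have hrec := ih (w - 1) (b + 1) (by omega)
            (fun _ => ⟨by omega, by omega⟩) hlen'
          simp only [gggLoop]
          rw [if_pos hbh, if_pos (show PySem.Int.mod b 2 = 0 ∧ True from ⟨hp, trivial⟩)]
          exact loop_step h_ w (w - 1) b (w - 1) (b + 1) hbh fuel hstep
            (by omega) (by omega) hlen' hrec
            (fun hn => ⟨rfl, by omega⟩)
        · have hstep := rem_step_even_mid h_ w a b hbh hp haw
          have hlen' : (remCells h_ w (a + 1) b).length < fuel := by
            rw [hstep] at hlen; simp at hlen; omega
          have hrec := ih (a + 1) b hb (fun _ => ⟨by omega, by omega⟩) hlen'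
          simp only [gggLoop]
          rw [if_pos hbh,
            if_neg (show ¬(PySem.Int.mod b 2 = 0 ∧ a = w - 1) from fun hc => ha hc.2),
            if_pos hp]
          exact loop_step h_ w a b (a + 1) b hbh fuel hstep
            (by omega) (by omega) hlen' hrec
            (fun hn => absurd hbh hn)
      · by_cases ha : a = 0
        · subst ha
          have hstep := rem_step_odd_end h_ w b hbh hp
          have hlen' : (remCells h_ w 0 (b + 1)).length < fuel := by
            rw [hstep] at hlen; simp at hlen; omega
          have hrec := ih 0 (b + 1) (by omega)
            (fun _ => ⟨by omega, by omega⟩) hlen'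
          simp only [gggLoop]
          rw [if_pos hbh,
            if_neg (show ¬(PySem.Int.mod b 2 = 0 ∧ (0 : Int) = w - 1) from fun hc => hp hc.1),
            if_neg hp, if_pos trivial]
          exact loop_step h_ w 0 b 0 (b + 1) hbh fuel hstep
            (by omega) (by omega) hlen' hrec
            (fun hn => ⟨rfl, by omega⟩)
        · have hstep := rem_step_odd_mid h_ w a b hbh hp ha0
          have hlen' : (remCells h_ w (a - 1) b).length < fuel := by
            rw [hstep] at hlen; simp at hlen; omega
          have hrec := ih (a - 1) b hb (fun _ => ⟨by omega, by omega⟩) hlen'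
          simp only [gggLoop]
          rw [if_pos hbh,
            if_neg (show ¬(PySem.Int.mod b 2 = 0 ∧ a = w - 1) from fun hc => hp hc.1),
            if_neg hp, if_neg ha]
          exact loop_step h_ w a b (a - 1) b hbh fuel hstep
            (by omega) (by omega) hlen' hrec
            (fun hn => absurd hbh hn)
    · rw [remCells_nil h_ w a b hbh]
      simp only [gggLoop, if_neg hbh]
      rfl

-- ===== VERDICT (by name: the statement is the Claim_ definition above) =====
theorem ggg_spec : Claim_equal_ggg := by
  intro h_ w _ hpre
  unfold Spec_ggg
  show ggg h_ w = ggg_alt h_ w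
  rw [alt_eq, snake_eq]
  unfold ggg
  rcases hpre with hh | hw
  · rw [show h_.toNat = 0 from by omega]
    simp only [gggLoop, if_neg (show ¬ (0 : Int) < h_ from by omega)]
    rfl
  · have hrem : remCells h_ w 0 0 = cellsFrom w h_.toNat 0 := by
      by_cases h0 : 0 < h_
      · rw [show h_.toNat = (h_ - (0 + 1)).toNat + 1 from by omega]
        show _ = rowCells w 0 ++ cellsFrom w (h_ - (0 + 1)).toNat (0 + 1)
        unfold remCells rowTail rowCells
        rw [if_pos h0, if_pos (show PySem.Int.mod 0 2 = 0 from by rw [mod2_eq]; rfl),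
            if_pos (show PySem.Int.mod 0 2 = 0 from by rw [mod2_eq]; rfl)]
      · rw [remCells_nil h_ w 0 0 h0, show h_.toNat = 0 from by omega]
        rfl
    have hlen : (remCells h_ w 0 0).length < h_.toNat * w.toNat + 1 := by
      rw [hrem, length_cellsFrom]
      omega
    rw [loop_eq h_ w hw (h_.toNat * w.toNat + 1) 0 0 le_rfl
        (fun _ => ⟨le_rfl, by omega⟩) hlen, hrem]
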